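-- pv_equiv track=rewrite | github.com/Janek21/Bioinfo_share_2Y_2T | Bruno/ASAB/programs/duringcourse/dot_matrix_basic.py | dot_matrix
-- ===== SOURCE A (Python) =====
-- def dot_matrix(seq1, seq2):
--
--     '''
--     >>> dot_matrix("FASTCAT", "FASTCAT")
--     [['o', ' ', ' ', ' ', ' ', ' ', ' '], [' ', 'o', ' ', ' ', ' ', 'o', ' '], [' ', ' ', 'o', ' ', ' ', ' ', ' '], [' ', ' ', ' ', 'o', ' ', ' ', 'o'], [' ', ' ', ' ', ' ', 'o', ' ', ' '], [' ', 'o', ' ', ' ', ' ', 'o', ' '], [' ', ' ', ' ', 'o', ' ', ' ', 'o']]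
--     >>> dot_matrix("FASTCAT", "TACTSAF")
--     [[' ', ' ', ' ', 'o', ' ', ' ', 'o'], [' ', 'o', ' ', ' ', ' ', 'o', ' '], [' ', ' ', ' ', ' ', 'o', ' ', ' '], [' ', ' ', ' ', 'o', ' ', ' ', 'o'], [' ', ' ', 'o', ' ', ' ', ' ', ' '], [' ', 'o', ' ', ' ', ' ', 'o', ' '], ['o', ' ', ' ', ' ', ' ', ' ', ' ']]
--     '''
--     matrix = []
--     for _ in range(len(seq2)):
--         row = []
--         for _ in range(len(seq1)):
--             row.append(' ')
--         matrix.append(row)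
--
--
--     for i in range(len(seq2)):
--
--         for j in range(len(seq1)):
--
--             if seq2[i] == seq1[j]:
--                 matrix[i][j] = 'o'
--
--     return matrix
-- ===== SOURCE B (Python) =====
-- def dot_matrix(seq1, seq2):
--     positions = {}
--     for j, c in enumerate(seq1):
--         positions.setdefault(c, []).append(j)
--     matrix = []
--     for c in seq2:
--         row = [' '] * len(seq1)
--         for j in positions.get(c, []):
--             row[j] = 'o'
--         matrix.append(row)
--     return matrix
-- ===== Notes on version B (the rewrite author's own statement) =====
-- stated objective: faster
-- what changed: B builds a character-to-positions index over seq1 in one pass, then emits each row as a fresh blank row with 'o' written only at the indexed matching columns, instead of A's per-cell equality scan over the full seq2 x seq1 grid mutating a prebuilt blank matrix.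
import Mathlib
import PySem

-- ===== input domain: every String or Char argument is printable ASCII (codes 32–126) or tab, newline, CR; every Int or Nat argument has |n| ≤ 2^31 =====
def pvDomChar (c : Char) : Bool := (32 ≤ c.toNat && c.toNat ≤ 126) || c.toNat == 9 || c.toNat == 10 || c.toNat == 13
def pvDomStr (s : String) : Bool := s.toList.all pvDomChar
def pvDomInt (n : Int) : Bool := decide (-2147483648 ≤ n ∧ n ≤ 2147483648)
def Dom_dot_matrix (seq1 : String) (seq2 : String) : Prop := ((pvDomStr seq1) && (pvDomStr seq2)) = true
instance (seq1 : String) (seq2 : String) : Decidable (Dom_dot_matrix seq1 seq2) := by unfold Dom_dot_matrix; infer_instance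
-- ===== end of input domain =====

-- B replaces A's per-cell equality scan over the full grid by a one-pass character→positions
-- index over seq1 plus per-row writes only at the indexed matching columns (alternative algorithm).

-- ===== PORT A =====
def dot_matrix (seq1 : String) (seq2 : String) : List (List String) :=
  let s1 := seq1.toList
  let s2 := seq2.toList
  -- first loop: build the blank matrix by appending rows of " "
  let matrix : List (List String) :=
    (PySem.List.pyRange 0 (s2.length : Int) 1).foldl
      (fun m _ => m ++ [(PySem.List.pyRange 0 (s1.length : Int) 1).foldl (fun r _ => r ++ [" "]) []]) []
  -- second loop: matrix[i][j] = 'o' when seq2[i] == seq1[j] (in-place row update modelled by pySetD)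
  (PySem.List.pyRange 0 (s2.length : Int) 1).foldl
    (fun m i =>
      (PySem.List.pyRange 0 (s1.length : Int) 1).foldl
        (fun m j =>
          if PySem.List.pyGetD s2 i ' ' = PySem.List.pyGetD s1 j ' ' then
            PySem.List.pySetD m i (PySem.List.pySetD (PySem.List.pyGetD m i []) j "o")
          else m) m) matrix

-- ===== PORT B =====
def dot_matrix_alt (seq1 : String) (seq2 : String) : List (List String) :=
  let s1 := seq1.toList
  -- first pass: index mapping each character of seq1 to the list of its column positions
  let positions : PySem.Dict Char (List Int) :=
    (PySem.List.enumerate s1).foldl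
      (fun d p => d.insert p.2 (d.getD p.2 [] ++ [p.1])) PySem.Dict.empty
  -- second pass: a fresh blank row per character of seq2, 'o' written only at indexed positions
  seq2.toList.foldl
    (fun m c =>
      m ++ [(positions.getD c []).foldl
              (fun row j => PySem.List.pySetD row j "o")
              (PySem.List.pyRepeat [" "] (s1.length : Int))]) []

-- ===== PRECONDITION & SPEC =====
def Spec_dot_matrix (seq1 : String) (seq2 : String) (out : List (List String)) : Prop := out = dot_matrix_alt seq1 seq2
instance (seq1 : String) (seq2 : String) (out : List (List String)) : Decidable (Spec_dot_matrix seq1 seq2 out) := by unfold Spec_dot_matrix; infer_instance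

-- ===== CLAIM (what is proved, stated in full; the proofs are below) =====
def Claim_equal_dot_matrix : Prop := ∀ (seq1 : String) (seq2 : String), Dom_dot_matrix seq1 seq2 → Spec_dot_matrix seq1 seq2 (dot_matrix seq1 seq2)

-- ===== LEMMAS AND PROOFS =====

-- the row of matches for character c against s1, as A's if-guarded column loop computes it
def rowFold (s1 : List Char) (c : Char) (r : List String) : List String :=
  (List.range s1.length).foldl (fun r j => if c = s1.getD j ' ' then r.set j "o" else r) r

lemma getD_set_self (m : List (List String)) (a : Nat) (x : List String) (ha : a < m.length) :
    (m.set a x).getD a [] = x := by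
  simp [List.getD_eq_getElem?_getD, ha]

lemma getD_set_ne (m : List (List String)) (a i : Nat) (x : List String) (h : a ≠ i) :
    (m.set a x).getD i [] = m.getD i [] := by
  simp [List.getD_eq_getElem?_getD, List.getElem?_set_ne h]

lemma take_succ_set (m : List (List String)) (a : Nat) (x : List String) (ha : a < m.length) :
    (m.set a x).take (a+1) = m.take a ++ [x] := by
  rw [List.set_eq_take_append_cons_drop, if_pos ha]
  have hta : (List.take a m).length = a := by simp; omega
  rw [show a + 1 = (List.take a m).length + 1 from by omega, List.take_append]
  simp

-- pulling one row update out of A's inner column loop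
lemma rowfold_extract (Q : Nat → Prop) [DecidablePred Q] (js : List Nat) :
    ∀ (m : List (List String)) (i : Nat), i < m.length →
    js.foldl (fun m j => if Q j then m.set i ((m.getD i []).set j "o") else m) m
      = m.set i (js.foldl (fun r j => if Q j then r.set j "o" else r) (m.getD i [])) := by
  induction js with
  | nil =>
    intro m i hi
    simp only [List.foldl_nil]
    rw [List.getD_eq_getElem?_getD, List.getElem?_eq_getElem hi]
    simp
  | cons j js ih =>
    intro m i hi
    simp only [List.foldl_cons]
    by_cases h : Q j
    · rw [if_pos h, if_pos h]
      have hl : (m.set i ((m.getD i []).set j "o")).length = m.length := by simp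
      rw [ih _ i (by omega)]
      rw [getD_set_self m i _ hi, List.set_set]
    · rw [if_neg h, if_neg h, ih _ i hi]

-- A's outer row loop: each iteration rewrites exactly row i
lemma outer_loop (s1 : List Char) (C : Nat → Char) :
    ∀ (k a : Nat) (m : List (List String)), a + k = m.length →
    (List.range' a k).foldl
        (fun m i => (List.range s1.length).foldl
          (fun m j => if C i = s1.getD j ' ' then m.set i ((m.getD i []).set j "o") else m) m) m
      = m.take a ++ (List.range' a k).map (fun i => rowFold s1 (C i) (m.getD i [])) := by
  intro k
  induction k with
  | zero =>
    intro a m h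
    have ht : m.take a = m := List.take_of_length_le (by omega)
    simp [ht]
  | succ k ih =>
    intro a m h
    rw [List.range'_succ]
    simp only [List.foldl_cons, List.map_cons]
    have ha : a < m.length := by omega
    rw [rowfold_extract (fun j => C a = s1.getD j ' ') (List.range s1.length) m a ha]
    set x := (List.range s1.length).foldl
      (fun r j => if C a = s1.getD j ' ' then r.set j "o" else r) (m.getD a []) with hx
    have hlen : a + 1 + k = (m.set a x).length := by simp; omega
    rw [ih (a+1) (m.set a x) hlen]
    have htail : (List.range' (a+1) k).map (fun i => rowFold s1 (C i) ((m.set a x).getD i []))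
        = (List.range' (a+1) k).map (fun i => rowFold s1 (C i) (m.getD i [])) := by
      apply List.map_congr_left
      intro i hi
      have hig : a + 1 ≤ i := (List.mem_range'_1.mp hi).1
      rw [getD_set_ne m a i x (by omega)]
    rw [htail, take_succ_set m a x ha, List.append_assoc, List.singleton_append]
    simp only [rowFold, hx]

lemma map_range_getD (s : List Char) (f : Char → List String) :
    (List.range s.length).map (fun i => f (s.getD i ' ')) = s.map f := by
  apply List.ext_getElem
  · simp
  · intro i h1 h2
    simp only [List.getElem_map, List.getElem_range]
    rw [List.getD_eq_getElem?_getD, List.getElem?_eq_getElem (by simpa using h2)]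
    simp

lemma A_eq_canon (seq1 seq2 : String) :
    dot_matrix seq1 seq2
      = seq2.toList.map (fun c => rowFold seq1.toList c (List.replicate seq1.toList.length " ")) := by
  unfold dot_matrix
  simp only [PySem.List.pyRange_zero_natCast, List.foldl_map,
    PySem.List.pyGetD_natCast, PySem.List.pySetD_natCast,
    PySem.List.foldl_append_singleton_eq_map, List.nil_append,
    List.map_const', List.length_range]
  rw [List.range_eq_range' (n := seq2.toList.length)]
  rw [outer_loop seq1.toList (fun i => seq2.toList.getD i ' ') seq2.toList.length 0
      (List.replicate seq2.toList.length (List.replicate seq1.toList.length " "))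
      (by simp)]
  simp only [List.take_zero, List.nil_append]
  rw [← List.range_eq_range']
  rw [← map_range_getD seq2.toList (fun c => rowFold seq1.toList c (List.replicate seq1.toList.length " "))]
  apply List.map_congr_left
  intro i hi
  have hi' : i < seq2.toList.length := List.mem_range.mp hi
  congr 1
  rw [List.getD_eq_getElem?_getD, List.getElem?_replicate]
  have hi2 : i < seq2.length := by simpa using hi'
  simp [hi2]

-- the position index built by B's first pass, looked up at c
lemma posIndex_getD (l : List (Int × Char)) :
    ∀ (d : PySem.Dict Char (List Int)) (c : Char),
    (l.foldl (fun d p => d.insert p.2 (d.getD p.2 [] ++ [p.1])) d).getD c []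
      = d.getD c [] ++ ((l.filter (fun p => p.2 == c)).map (·.1)) := by
  induction l with
  | nil => intro d c; simp
  | cons p l ih =>
    intro d c
    simp only [List.foldl_cons, List.filter_cons]
    by_cases h : p.2 = c
    · rw [ih]
      rw [PySem.Dict.getD_insert]
      simp [h, List.append_assoc]
    · rw [ih]
      rw [PySem.Dict.getD_insert]
      simp [h, Ne.symm h]

lemma B_eq_canon (seq1 seq2 : String) :
    dot_matrix_alt seq1 seq2
      = seq2.toList.map (fun c => rowFold seq1.toList c (List.replicate seq1.toList.length " ")) := by
  unfold dot_matrix_alt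
  rw [PySem.List.foldl_append_singleton_eq_map, List.nil_append]
  apply List.map_congr_left
  intro c _
  rw [posIndex_getD]
  simp only [PySem.Dict.getD_empty, List.nil_append]
  rw [PySem.List.enumerate_eq_map_pyRange seq1.toList ' ']
  simp only [PySem.List.len]
  rw [PySem.List.pyRange_zero_natCast]
  rw [List.filter_map, List.map_map, List.filter_map, List.map_map]
  simp only [Function.comp_def, PySem.List.pyGetD_natCast]
  rw [List.foldl_map]
  simp only [PySem.List.pySetD_natCast, PySem.List.pyRepeat_singleton, Int.toNat_natCast]
  unfold rowFold
  rw [PySem.List.foldl_ite_eq_foldl_filter (fun j => c = seq1.toList.getD j ' ')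
      (fun r j => r.set j "o") (List.range seq1.toList.length)
      (List.replicate seq1.toList.length " ")]
  congr 1
  apply List.filter_congr
  intro j _
  by_cases h : c = seq1.toList[j]?.getD ' '
  · simp [h]
  · simp [h, Ne.symm h]

-- ===== VERDICT (by name: the statement is the Claim_ definition above) =====
theorem dot_matrix_spec : Claim_equal_dot_matrix := by
  intro seq1 seq2 _
  unfold Spec_dot_matrix
  rw [A_eq_canon, B_eq_canon]
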